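-- pv_equiv track=rewrite | github.com/Oybekhon0234/Printer | venv/bir.py | generate_kitobcha_pages
-- ===== SOURCE A (Python) =====
-- def generate_kitobcha_pages(n):
--     if n <= 0:
--         return [], []
--
--     total = n
--     while total % 4 != 0:
--         total += 1
--
--     old_tomon = []
--     orqa_tomon = []
--
--     left = 1
--     right = total
--
--     while left <= total // 2:
--         old_tomon.append(right)
--         old_tomon.append(left)
--         right -= 1
--         left += 1
--
--         orqa_tomon.append(left)
--         orqa_tomon.append(right)
--         left += 1
--         right -= 1
--     return old_tomon[:n], orqa_tomon[:n]
-- ===== SOURCE B (Python) =====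
-- def generate_kitobcha_pages(n):
--     if n <= 0:
--         return [], []
--     total = -(-n // 4) * 4
--     half = total // 2
--     # Front-side even pages of the sheets, outermost sheet first.  The two pages on
--     # a sheet's front sum to total+1, and its back pages are their neighbours.
--     fronts = range(total, half, -2)
--     old_tomon = [0] * half
--     old_tomon[0::2] = fronts
--     old_tomon[1::2] = [total + 1 - e for e in fronts]
--     orqa_tomon = [0] * half
--     orqa_tomon[0::2] = [total + 2 - e for e in fronts]
--     orqa_tomon[1::2] = [e - 1 for e in fronts]
--     return old_tomon[:n], orqa_tomon[:n]
-- ===== Notes on version B (the rewrite author's own statement) =====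
-- stated objective: alternative
-- what changed: Replaces the stateful two-pointer interleaving loop (and the round-up while-loop) with allocate-and-fill by strided slice assignment: the front list's even slots take the sheets' descending even pages, the remaining slots are their sheet partners given by the facing-pages-sum identity, and the back list holds the neighbouring pages of the corresponding front pages.
import Mathlib
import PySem

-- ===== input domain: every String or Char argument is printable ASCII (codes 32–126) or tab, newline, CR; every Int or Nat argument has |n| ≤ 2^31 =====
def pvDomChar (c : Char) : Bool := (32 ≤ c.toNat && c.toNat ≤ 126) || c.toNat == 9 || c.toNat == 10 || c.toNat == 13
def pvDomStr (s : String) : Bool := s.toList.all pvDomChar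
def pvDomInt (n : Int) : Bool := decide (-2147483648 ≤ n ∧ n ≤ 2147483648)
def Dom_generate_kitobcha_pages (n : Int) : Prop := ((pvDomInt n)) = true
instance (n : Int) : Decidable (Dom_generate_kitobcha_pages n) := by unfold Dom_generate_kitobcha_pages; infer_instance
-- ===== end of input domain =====

-- B replaces A's stateful two-pointer interleaving loop (and the round-up while-loop) by
-- allocate-and-fill with strided slice assignments driven by the facing-pages-sum identity;
-- same return value.

-- ===== PORT A =====
-- A's `while total % 4 != 0: total += 1`, fuel-bounded to make it total: 4 steps always
-- suffice (total % 4 ∈ [0,4) and each step increments), so the guard is unchanged.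
def pvRound4 (fuel : Nat) (t : Int) : Int :=
  match fuel with
  | 0 => t
  | fuel+1 => if PySem.Int.mod t 4 ≠ 0 then pvRound4 fuel (t + 1) else t

-- A's main while-loop, fuel-bounded to make it total (left rises by 2 per iteration, so
-- total.toNat steps suffice). Python's O(1) list.append is transliterated as the standard
-- reversed-cons accumulator (reversed once at the end): one iteration pushes right then left
-- onto old, left+1 then right-1 onto orqa, then left += 2, right -= 2 (the sequential
-- updates flattened, same values).
def pvLoop (total : Int) (oldR orqaR : List Int) (left right : Int) : Nat → List Int × List Int
  | 0 => (oldR, orqaR)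
  | fuel+1 =>
    if left ≤ PySem.Int.floordiv total 2 then
      pvLoop total (left :: right :: oldR) ((right - 1) :: (left + 1) :: orqaR) (left + 2) (right - 2) fuel
    else (oldR, orqaR)

def generate_kitobcha_pages (n : Int) : List Int × List Int :=
  if n ≤ 0 then ([], [])
  else
    let total := pvRound4 4 n
    let (old_tomon, orqa_tomon) := pvLoop total [] [] 1 total total.toNat
    (PySem.List.slice old_tomon.reverse none (some n), PySem.List.slice orqa_tomon.reverse none (some n))

-- ===== PORT B =====
-- Hand port of Python's extended slice assignment `l[0::2] = vals` / `l[1::2] = vals`: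
-- exact when len(vals) equals the number of targeted slots (Python raises ValueError
-- otherwise; every use in Source B matches exactly, which the equivalence proof confirms).
def pvSetEven : List Int → List Int → List Int
  | l, [] => l
  | [], _ => []
  | [_], v :: _ => [v]
  | _ :: b :: t, v :: vs => v :: b :: pvSetEven t vs

def pvSetOdd : List Int → List Int → List Int
  | [], _ => []
  | a :: t, vs => a :: pvSetEven t vs

def generate_kitobcha_pages_alt (n : Int) : List Int × List Int :=
  if n ≤ 0 then ([], [])
  else
    let total := -(PySem.Int.floordiv (-n) 4) * 4
    let half := PySem.Int.floordiv total 2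
    let fronts := PySem.List.pyRange total half (-2)
    let old_tomon := pvSetOdd (pvSetEven (PySem.List.pyRepeat [0] half) fronts)
      (fronts.map (fun e => total + 1 - e))
    let orqa_tomon := pvSetOdd (pvSetEven (PySem.List.pyRepeat [0] half) (fronts.map (fun e => total + 2 - e)))
      (fronts.map (fun e => e - 1))
    (PySem.List.slice old_tomon none (some n), PySem.List.slice orqa_tomon none (some n))

-- ===== PRECONDITION & SPEC =====
def Spec_generate_kitobcha_pages (n : Int) (out : List Int × List Int) : Prop := out = generate_kitobcha_pages_alt n
instance (n : Int) (out : List Int × List Int) : Decidable (Spec_generate_kitobcha_pages n out) := by unfold Spec_generate_kitobcha_pages; infer_instance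

-- ===== CLAIM (what is proved, stated in full; the proofs are below) =====
def Claim_equal_generate_kitobcha_pages : Prop := ∀ (n : Int), Dom_generate_kitobcha_pages n → Spec_generate_kitobcha_pages n (generate_kitobcha_pages n)

-- ===== LEMMAS AND PROOFS =====

lemma pvRound4_eq (t : Int) : pvRound4 4 t = t + (4 - t % 4) % 4 := by
  simp only [pvRound4, PySem.Int.mod_eq_emod_of_pos (show (0:Int) < 4 by decide)]
  split_ifs with h1 h2 h3 h4 <;> omega

lemma pvTotal_eq (n : Int) : pvRound4 4 n = -(PySem.Int.floordiv (-n) 4) * 4 := by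
  rw [pvRound4_eq, PySem.Int.floordiv_eq_ediv_of_pos (by norm_num : (0:Int) < 4)]
  omega

-- interleaving, used only to state the invariants below
def pvWeave : List Int → List Int → List Int
  | x :: xs, y :: ys => x :: y :: pvWeave xs ys
  | _, _ => []

lemma pyRange_neg2_nil (a b : Int) (h : a ≤ b) : PySem.List.pyRange a b (-2) = [] := by
  simp only [PySem.List.pyRange]
  norm_num
  intro hba
  omega

lemma pyRange_neg2_cons (a b : Int) (h : b < a) :
    PySem.List.pyRange a b (-2) = a :: PySem.List.pyRange (a - 2) b (-2) := by
  simp only [PySem.List.pyRange]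
  norm_num
  rw [if_pos h]
  by_cases h2 : b < a - 2
  · rw [if_pos h2]
    have hc : (a - b + 2 - 1) / 2 = (a - 2 - b + 2 - 1) / 2 + 1 := by omega
    have hn : ((a - b + 2 - 1) / 2).toNat = ((a - 2 - b + 2 - 1) / 2).toNat + 1 := by omega
    rw [hn, List.range_succ_eq_map]
    simp [List.map_map, Function.comp_def]
    intro x _
    ring
  · rw [if_neg h2]
    have hc : (a - b + 2 - 1) / 2 = 1 := by omega
    rw [hc]
    simp [List.range_succ]

lemma pyRange_neg2_length : ∀ (j : Nat) (a b : Int), a = b + 2*(j:Int) →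
    (PySem.List.pyRange a b (-2)).length = j := by
  intro j
  induction j with
  | zero => intro a b h; rw [pyRange_neg2_nil a b (by omega)]; rfl
  | succ j ih =>
    intro a b h
    rw [pyRange_neg2_cons a b (by push_cast at h; omega)]
    simp only [List.length_cons]
    rw [ih (a - 2) b (by push_cast at h ⊢; omega)]

lemma pvSetEven_flat : ∀ (xs : List Int),
    pvSetEven (List.replicate (2 * xs.length) 0) xs = xs.flatMap (fun x => [x, 0]) := by
  intro xs
  induction xs with
  | nil => rfl
  | cons x xs ih =>
    have : 2 * (x :: xs).length = (2 * xs.length) + 1 + 1 := by simp; omega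
    rw [this, List.replicate_succ, List.replicate_succ]
    simp only [pvSetEven, List.flatMap_cons]
    rw [ih]
    rfl

lemma pvSetEven_mid : ∀ (xs ys : List Int) (y : Int), xs.length = ys.length →
    pvSetEven (0 :: xs.flatMap (fun x => [x, 0])) (y :: ys) = y :: pvWeave xs ys := by
  intro xs
  induction xs with
  | nil =>
    intro ys y h
    cases ys with
    | nil => rfl
    | cons _ _ => simp at h
  | cons x xs ih =>
    intro ys y h
    cases ys with
    | nil => simp at h
    | cons y2 ys =>
      simp only [List.flatMap_cons, List.cons_append, pvSetEven, pvWeave, List.nil_append]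
      rw [ih ys y2 (by simpa using h)]

lemma pvSetOdd_weave : ∀ (xs ys : List Int), xs.length = ys.length →
    pvSetOdd (xs.flatMap (fun x => [x, 0])) ys = pvWeave xs ys := by
  intro xs ys h
  cases xs with
  | nil =>
    cases ys with
    | nil => rfl
    | cons _ _ => simp at h
  | cons x xs =>
    cases ys with
    | nil => simp at h
    | cons y ys =>
      simp only [List.flatMap_cons, List.cons_append, pvSetOdd, pvWeave, List.nil_append]
      rw [pvSetEven_mid xs ys y (by simpa using h)]

-- B's construction collapses to the weave of the front pages with their derived partners
lemma pvAlt_weave (xs ys : List Int) (half : Int) (hlen : xs.length = ys.length)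
    (hhalf : half.toNat = 2 * xs.length) :
    pvSetOdd (pvSetEven (PySem.List.pyRepeat [0] half) xs) ys = pvWeave xs ys := by
  rw [PySem.List.pyRepeat_singleton, hhalf, pvSetEven_flat, pvSetOdd_weave xs ys hlen]

-- A's loop computes the reversed weaves of the remaining front pages
lemma pvLoop_weave : ∀ (j : Nat) (total : Int) (old orqa : List Int) (k : Int) (fuel : Nat),
    j ≤ fuel → total = 4*k + 4*(j:Int) →
    pvLoop total old orqa (2*k+1) (total - 2*k) fuel =
      ((pvWeave (PySem.List.pyRange (total - 2*k) (PySem.Int.floordiv total 2) (-2))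
          ((PySem.List.pyRange (total - 2*k) (PySem.Int.floordiv total 2) (-2)).map (fun e => total + 1 - e))).reverse ++ old,
       (pvWeave ((PySem.List.pyRange (total - 2*k) (PySem.Int.floordiv total 2) (-2)).map (fun e => total + 2 - e))
          ((PySem.List.pyRange (total - 2*k) (PySem.Int.floordiv total 2) (-2)).map (fun e => e - 1))).reverse ++ orqa) := by
  intro j
  induction j with
  | zero =>
    intro total old orqa k fuel _ hk
    have hh : PySem.Int.floordiv total 2 = 2*k := by
      rw [PySem.Int.floordiv_eq_ediv_of_pos (by norm_num : (0:Int) < 2)]; omega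
    rw [hh, pyRange_neg2_nil (total - 2*k) (2*k) (by omega)]
    have hguard : ¬ (2*k+1 ≤ (2*k : Int)) := by omega
    cases fuel with
    | zero => simp [pvLoop, pvWeave]
    | succ f => rw [pvLoop, hh, if_neg hguard]; simp [pvWeave]
  | succ j ih =>
    intro total old orqa k fuel hf hk
    cases fuel with
    | zero => omega
    | succ f =>
      have hh : PySem.Int.floordiv total 2 = 2*k + 2*((j:Int)+1) := by
        rw [PySem.Int.floordiv_eq_ediv_of_pos (by norm_num : (0:Int) < 2)]
        push_cast at hk; omega
      have hguard : (2*k+1 ≤ PySem.Int.floordiv total 2) := by rw [hh]; omega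
      rw [pvLoop, if_pos hguard]
      have e1 : (2*k+1) + 2 = 2*(k+1) + 1 := by ring
      have e2 : total - 2*k - 2 = total - 2*(k+1) := by ring
      rw [e1, e2, ih total _ _ (k+1) f (by omega) (by push_cast at hk ⊢; omega)]
      have hcons : PySem.List.pyRange (total - 2*k) (PySem.Int.floordiv total 2) (-2)
          = (total - 2*k) :: PySem.List.pyRange (total - 2*(k+1)) (PySem.Int.floordiv total 2) (-2) := by
        rw [pyRange_neg2_cons (total - 2*k) (PySem.Int.floordiv total 2) (by rw [hh]; omega),
          show total - 2*k - 2 = total - 2*(k+1) from by ring]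
      rw [hcons]
      simp only [List.map_cons, pvWeave, List.reverse_cons, List.append_assoc,
        List.cons_append, List.nil_append, Prod.mk.injEq]
      constructor <;>
        · congr 1
          simp only [List.cons.injEq]
          and_intros <;> first | ring | trivial

-- ===== VERDICT (by name: the statement is the Claim_ definition above) =====
theorem generate_kitobcha_pages_spec : Claim_equal_generate_kitobcha_pages := by
  intro n _
  unfold Spec_generate_kitobcha_pages generate_kitobcha_pages generate_kitobcha_pages_alt
  by_cases hn : n ≤ 0
  · simp [hn]
  · simp only [if_neg hn]
    rw [pvTotal_eq]
    set T : Int := -(PySem.Int.floordiv (-n) 4) * 4 with hT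
    have hdiv : PySem.Int.floordiv (-n) 4 = (-n) / 4 :=
      PySem.Int.floordiv_eq_ediv_of_pos (by norm_num : (0:Int) < 4)
    have hTval : T = -((-n)/4) * 4 := by rw [hT, hdiv]
    have hTpos : 0 < T := by omega
    have hmod : T % 4 = 0 := by omega
    have hhalf : PySem.Int.floordiv T 2 = T / 2 :=
      PySem.Int.floordiv_eq_ediv_of_pos (by norm_num : (0:Int) < 2)
    set j : Nat := (T/4).toNat with hj
    have hTj : T = 4*(0:Int) + 4*((j:Nat):Int) := by rw [hj]; push_cast; omega
    have hchar := pvLoop_weave j T [] [] 0 T.toNat (by rw [hj]; omega) hTj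
    rw [show (2:Int)*0+1 = 1 from by norm_num, show T - 2*0 = T from by ring] at hchar
    rw [hchar]
    set fr : List Int := PySem.List.pyRange T (PySem.Int.floordiv T 2) (-2) with hfr
    have hfrlen : fr.length = j := by
      rw [hfr, hhalf]
      exact pyRange_neg2_length j T (T/2) (by rw [hj]; omega)
    have hhalfNat : (PySem.Int.floordiv T 2).toNat = 2 * fr.length := by
      rw [hfrlen, hhalf, hj]; omega
    rw [pvAlt_weave fr (fr.map (fun e => T + 1 - e)) _ (by simp) hhalfNat,
        pvAlt_weave (fr.map (fun e => T + 2 - e)) (fr.map (fun e => e - 1)) _ (by simp)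
          (by rw [List.length_map]; exact hhalfNat)]
    simp
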